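-- pv_equiv track=rewrite | github.com/soroa/master_thesis_python | rep_counting.py | get_sum_by_contraction
-- ===== SOURCE A (Python) =====
-- def get_sum_by_contraction(sequence):
--     sum = 0
--     previous = -1
--     for s in sequence:
--         if s == 1 and previous != 1:
--             sum += 1
--         previous = s
--     return sum
-- ===== SOURCE B (Python) =====
-- def get_sum_by_contraction(sequence):
--     seq = list(sequence)
--     ones = sum(1 for x in seq if x == 1)
--     adjacent_one_pairs = sum(1 for a, b in zip(seq, seq[1:]) if a == 1 and b == 1)
--     return ones - adjacent_one_pairs
-- ===== Notes on version B (the rewrite author's own statement) =====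
-- stated objective: alternative
-- what changed: Replaced the stateful previous-tracking transition counter with a stateless arithmetic identity: count all ones, count adjacent pairs of ones, and subtract, since a run of k ones contributes k minus (k-1) = 1.
import Mathlib
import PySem

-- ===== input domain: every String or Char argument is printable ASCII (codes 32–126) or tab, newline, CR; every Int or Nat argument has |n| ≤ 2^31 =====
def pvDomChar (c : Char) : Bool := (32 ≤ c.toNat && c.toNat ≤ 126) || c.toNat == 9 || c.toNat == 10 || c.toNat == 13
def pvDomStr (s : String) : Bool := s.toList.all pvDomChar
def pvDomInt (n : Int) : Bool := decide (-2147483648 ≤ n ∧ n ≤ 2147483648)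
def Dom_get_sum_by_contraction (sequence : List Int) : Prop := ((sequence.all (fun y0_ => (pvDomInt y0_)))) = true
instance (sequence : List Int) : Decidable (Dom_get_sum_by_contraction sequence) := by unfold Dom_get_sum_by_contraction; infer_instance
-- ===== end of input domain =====

-- B replaces A's stateful previous-tracking counter with a stateless arithmetic
-- identity: (#1s) - (#adjacent pairs of ones); alternative decomposition, same cost.

-- ===== PORT A =====
-- literal port of A's loop: state (sum, previous), previous starts at -1
def get_sum_by_contraction (sequence : List Int) : Int :=
  (sequence.foldl
    (fun (st : Int × Int) s =>
      (if s == 1 && !(st.2 == 1) then st.1 + 1 else st.1, s))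
    (0, -1)).1

-- ===== PORT B =====
-- ones = count of elements equal to 1; pairs = count of adjacent pairs of ones
-- (zip of seq with seq[1:], i.e. its tail); result = ones - pairs
def get_sum_by_contraction_alt (sequence : List Int) : Int :=
  (sequence.countP (fun x => x == 1) : Int)
    - ((sequence.zip sequence.tail).countP (fun p => p.1 == 1 && p.2 == 1) : Int)

-- ===== PRECONDITION & SPEC =====
def Spec_get_sum_by_contraction (sequence : List Int) (out : Int) : Prop := out = get_sum_by_contraction_alt sequence
instance (sequence : List Int) (out : Int) : Decidable (Spec_get_sum_by_contraction sequence out) := by unfold Spec_get_sum_by_contraction; infer_instance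

-- ===== CLAIM =====
def Claim_equal_get_sum_by_contraction : Prop := ∀ (sequence : List Int), Dom_get_sum_by_contraction sequence → Spec_get_sum_by_contraction sequence (get_sum_by_contraction sequence)

-- ===== LEMMAS AND PROOFS =====

-- the value of A's loop from any prev, expressed recursively
def pvCnt (prev : Int) : List Int → Int
  | [] => 0
  | x :: xs => (if x == 1 && !(prev == 1) then 1 else 0) + pvCnt x xs

theorem pvFoldl_cnt (seq : List Int) : ∀ (acc prev : Int),
    (seq.foldl
      (fun (st : Int × Int) s =>
        (if s == 1 && !(st.2 == 1) then st.1 + 1 else st.1, s))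
      (acc, prev)).1 = acc + pvCnt prev seq := by
  induction seq with
  | nil => intro acc prev; simp [pvCnt]
  | cons x xs ih =>
    intro acc prev
    simp only [List.foldl_cons, pvCnt, ih]
    split <;> ring

-- B's two counts as Int
def pvOnes (xs : List Int) : Int := (xs.countP (fun x => x == 1) : Int)
def pvPairs (xs : List Int) : Int :=
  ((xs.zip xs.tail).countP (fun p => p.1 == 1 && p.2 == 1) : Int)

theorem pvPairs_cons (x : Int) (xs : List Int) :
    pvPairs (x :: xs) =
      (if x = 1 ∧ xs.head? = some 1 then 1 else 0) + pvPairs xs := by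
  cases xs with
  | nil => simp [pvPairs]
  | cons y ys =>
    simp only [pvPairs, List.tail_cons, List.zip_cons_cons, List.countP_cons, List.head?_cons]
    by_cases hx : x = 1 <;> by_cases hy : y = 1 <;>
      simp [hx, hy] <;> push_cast <;> ring

-- the arithmetic identity: ones - pairs = A count from prev, corrected by
-- whether prev = 1 and the list starts with 1
theorem pvCnt_eq (xs : List Int) : ∀ (prev : Int),
    pvCnt prev xs =
      pvOnes xs - pvPairs xs - (if prev = 1 ∧ xs.head? = some 1 then 1 else 0) := by
  induction xs with
  | nil => intro prev; simp [pvCnt, pvOnes, pvPairs]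
  | cons x xs ih =>
    intro prev
    simp only [pvCnt, ih, pvPairs_cons, List.head?_cons, pvOnes, List.countP_cons]
    by_cases hx : x = 1 <;> by_cases hp : prev = 1 <;>
      simp [hx, hp] <;> push_cast <;> ring

-- ===== VERDICT =====
theorem get_sum_by_contraction_spec : Claim_equal_get_sum_by_contraction := by
  intro seq _
  show get_sum_by_contraction seq = get_sum_by_contraction_alt seq
  have h := pvCnt_eq seq (-1)
  have hne : ¬((-1 : Int) = 1 ∧ seq.head? = some 1) := by
    rintro ⟨h1, _⟩; norm_num at h1
  rw [if_neg hne] at h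
  have hA : get_sum_by_contraction seq = pvCnt (-1) seq := by
    simpa only [get_sum_by_contraction, zero_add] using pvFoldl_cnt seq 0 (-1)
  rw [hA, h]
  simp [get_sum_by_contraction_alt, pvOnes, pvPairs]
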